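-- pv_equiv track=rewrite | github.com/hoquangnam45/step_counting | record_data/find_thresh.py | countPeak
-- ===== SOURCE A (Python) =====
-- def countPeak(thresh, array):
--     flag = 0
--     count = 0
--     for i in array:
--         if (i < thresh):
--             flag = 1
--         elif (i >= thresh and flag == 1):
--             flag = 0
--             count += 1
--     return count
-- ===== SOURCE B (Python) =====
-- def countPeak(thresh, array):
--     # count adjacent pairs where a below-threshold element is followed by an at/above-threshold one
--     return sum(1 for a, b in zip(array, array[1:]) if a < thresh and b >= thresh)
-- ===== Notes on version B (the rewrite author's own statement) =====
-- stated objective: simpler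
-- what changed: Replaced the per-element flag state machine with a one-line pairwise scan counting adjacent (below, at/above) pairs via zip.
import Mathlib
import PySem

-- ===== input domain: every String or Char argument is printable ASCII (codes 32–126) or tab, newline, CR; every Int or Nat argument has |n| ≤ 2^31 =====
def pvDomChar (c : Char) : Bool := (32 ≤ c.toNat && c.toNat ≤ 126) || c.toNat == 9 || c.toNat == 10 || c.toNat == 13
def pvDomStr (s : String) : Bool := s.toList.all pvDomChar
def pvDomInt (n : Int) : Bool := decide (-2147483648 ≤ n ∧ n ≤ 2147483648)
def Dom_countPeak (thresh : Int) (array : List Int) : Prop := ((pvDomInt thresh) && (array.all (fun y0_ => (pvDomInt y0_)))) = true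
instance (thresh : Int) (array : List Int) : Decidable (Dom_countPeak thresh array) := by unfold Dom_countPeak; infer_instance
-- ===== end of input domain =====

-- B replaces A's flag state machine with a pairwise zip scan counting (below, at/above) adjacent pairs; objective: simpler.


-- ===== PORT A =====
-- the Python for-loop over array carrying (flag, count)
def countPeakGo (thresh : Int) (l : List Int) (flag : Int) (count : Int) : Int :=
  match l with
  | [] => count
  | i :: rest =>
    if i < thresh then countPeakGo thresh rest 1 count
    else if thresh ≤ i ∧ flag = 1 then countPeakGo thresh rest 0 (count + 1)
    else countPeakGo thresh rest flag count

def countPeak (thresh : Int) (array : List Int) : Int :=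
  countPeakGo thresh array 0 0

-- ===== PORT B =====
def countPeak_alt (thresh : Int) (array : List Int) : Int :=
  ((array.zip array.tail).filter (fun p => decide (p.1 < thresh) && decide (thresh ≤ p.2))).length

-- ===== PRECONDITION & SPEC =====
def Spec_countPeak (thresh : Int) (array : List Int) (out : Int) : Prop := out = countPeak_alt thresh array
instance (thresh : Int) (array : List Int) (out : Int) : Decidable (Spec_countPeak thresh array out) := by unfold Spec_countPeak; infer_instance

-- ===== CLAIM (what is proved, stated in full; the proofs are below) =====
def Claim_equal_countPeak : Prop := ∀ (thresh : Int) (array : List Int), Dom_countPeak thresh array → Spec_countPeak thresh array (countPeak thresh array)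

-- ===== LEMMAS AND PROOFS =====

-- 1 if the head of l is ≥ thresh (a pending below-run would be closed), else 0
def headHigh (thresh : Int) (l : List Int) : Int :=
  match l with
  | [] => 0
  | y :: _ => if thresh ≤ y then 1 else 0

theorem countPeakGo_eq (thresh : Int) (l : List Int) :
    ∀ (flag count : Int),
      countPeakGo thresh l flag count =
        count + countPeak_alt thresh l + (if flag = 1 then headHigh thresh l else 0) := by
  induction l with
  | nil => intro flag count; simp [countPeakGo, countPeak_alt, headHigh]
  | cons x rest ih =>
    intro flag count
    have hsplit : countPeak_alt thresh (x :: rest) =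
        (if x < thresh then headHigh thresh rest else 0) + countPeak_alt thresh rest := by
      cases rest with
      | nil => simp [countPeak_alt, headHigh]
      | cons y rs =>
        simp only [countPeak_alt, headHigh, List.tail, List.zip, List.zipWith, List.filter]
        by_cases hx : x < thresh <;> by_cases hy : thresh ≤ y <;>
          simp [hx, hy] <;> push_cast <;> ring
    by_cases hx : x < thresh
    · rw [countPeakGo]
      simp only [hx, if_pos]
      rw [ih 1 count, hsplit]
      have hxh : headHigh thresh (x :: rest) = 0 := by
        simp [headHigh]; omega
      simp [hxh, hx]
      ring
    · have hge : thresh ≤ x := by omega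
      by_cases hf : flag = 1
      · rw [countPeakGo]
        simp only [hx, if_pos (And.intro hge hf)]
        rw [ih 0 (count + 1), hsplit]
        have hxh : headHigh thresh (x :: rest) = 1 := by simp [headHigh, hge]
        simp [hf, hxh, hx]
        ring
      · rw [countPeakGo]
        simp only [hx]
        have : ¬ (thresh ≤ x ∧ flag = 1) := by tauto
        simp only [this, if_neg, not_false_iff]
        rw [ih flag count, hsplit]
        simp [hf, hx]

-- ===== VERDICT (by name: the statement is the Claim_ definition above) =====
theorem countPeak_spec : Claim_equal_countPeak := by
  intro thresh array _
  unfold Spec_countPeak countPeak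
  rw [countPeakGo_eq]
  simp
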